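-- pv_equiv track=rewrite | github.com/Hardeepsingh980/deecode.herokuapp.com | deecode/code2.py | main_code
-- ===== SOURCE A (Python) =====
-- def main_code(in_):
--   def codes(l):
--     d = []
--     for code in l:
--       if code == "2":
--         d.append("A")
--       elif code == "22":
--         d.append("B")
--       elif code == "222":
--        d.append ("C")
--       elif code == "3":
--        d.append ("D")
--       elif code == "33":
--        d.append ("E")
--       elif code == "333":
--         d.append("F")
--       elif code == "4":
--         d.append("G")
--       elif code == "44":
--          d.append("H")
--       elif code == "444":
--         d.append("I")
--       elif code == "5":
--         d.append("J")
--       elif code == "55":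
--         d.append("K")
--       elif code == "555":
--         d.append("L")
--       elif code == "6":
--         d.append("M")
--       elif code == "66":
--         d.append("N")
--       elif code == "666":
--         d.append("O")
--       elif code == "7":
--          d.append("P")
--       elif code == "77":
--        d.append ("Q")
--       elif code == "777":
--         d.append("R")
--       elif code == "7777":
--         d.append("S")
--       elif code == "8":
--         d.append("T")
--       elif code == "88":
--         d.append("U")
--       elif code == "888":
--         d.append("V")
--       elif code == "9":
--         d.append("W")
--       elif code == "99":
--          d.append("X")
--       elif code == "999":
--         d.append("Y")
--       elif code == "9999":
--         d.append("Z")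
--       elif code == "0":
--          d.append(" ")
--     ans = ''.join(d)
--     return ans
--
--   name = in_.split(",")
--   l1 = []
--   for i in name:
--     l1.append(i)
--
--   return codes(l1)
-- ===== SOURCE B (Python) =====
-- LAYOUT = {"2": "ABC", "3": "DEF", "4": "GHI", "5": "JKL",
--           "6": "MNO", "7": "PQRS", "8": "TUV", "9": "WXYZ", "0": " "}
--
-- def main_code(in_):
--     out = []
--     for code in in_.split(","):
--         if code and all(ch == code[0] for ch in code):
--             letters = LAYOUT.get(code[0])
--             if letters is not None and len(code) <= len(letters):
--                 out.append(letters[len(code) - 1])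
--     return "".join(out)
-- ===== Notes on version B (the rewrite author's own statement) =====
-- stated objective: simpler
-- what changed: Replaces the 27-branch literal if/elif chain with a keypad layout table keyed by the token's first digit, decoding each token as layout[digit][len(token)-1] after checking the token is a uniform repetition within the table's range.
import Mathlib
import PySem

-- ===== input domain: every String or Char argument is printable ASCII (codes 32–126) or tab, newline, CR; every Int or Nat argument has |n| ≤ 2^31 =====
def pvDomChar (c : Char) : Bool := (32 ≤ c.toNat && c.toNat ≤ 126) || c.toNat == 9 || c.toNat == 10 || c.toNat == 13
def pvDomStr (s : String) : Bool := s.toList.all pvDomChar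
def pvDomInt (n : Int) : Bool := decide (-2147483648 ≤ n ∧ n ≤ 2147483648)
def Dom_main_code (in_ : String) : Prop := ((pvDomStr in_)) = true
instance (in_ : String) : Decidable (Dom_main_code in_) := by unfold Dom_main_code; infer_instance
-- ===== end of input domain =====

-- B replaces A's 27-branch literal if/elif chain by a keypad layout table indexed by
-- the token's first digit and its repetition count (objective: simpler).

-- ===== PORT A =====
-- the body of A's inner 'for code in l' loop: the 27-way elif chain
def mcA_step (d : List String) (code : String) : List String :=
  if code = "2" then d ++ ["A"]
  else if code = "22" then d ++ ["B"]
  else if code = "222" then d ++ ["C"]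
  else if code = "3" then d ++ ["D"]
  else if code = "33" then d ++ ["E"]
  else if code = "333" then d ++ ["F"]
  else if code = "4" then d ++ ["G"]
  else if code = "44" then d ++ ["H"]
  else if code = "444" then d ++ ["I"]
  else if code = "5" then d ++ ["J"]
  else if code = "55" then d ++ ["K"]
  else if code = "555" then d ++ ["L"]
  else if code = "6" then d ++ ["M"]
  else if code = "66" then d ++ ["N"]
  else if code = "666" then d ++ ["O"]
  else if code = "7" then d ++ ["P"]
  else if code = "77" then d ++ ["Q"]
  else if code = "777" then d ++ ["R"]
  else if code = "7777" then d ++ ["S"]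
  else if code = "8" then d ++ ["T"]
  else if code = "88" then d ++ ["U"]
  else if code = "888" then d ++ ["V"]
  else if code = "9" then d ++ ["W"]
  else if code = "99" then d ++ ["X"]
  else if code = "999" then d ++ ["Y"]
  else if code = "9999" then d ++ ["Z"]
  else if code = "0" then d ++ [" "]
  else d

-- A's inner helper 'codes(l)'
def mcA_codes (l : List String) : String :=
  PySem.Str.join "" (l.foldl mcA_step [])

def main_code (in_ : String) : String :=
  -- in_.split(","): sep is nonempty so split? is always 'some'; getD only totalizes
  let name := (PySem.Str.split? in_ ",").getD []
  let l1 := name.foldl (fun l i => l ++ [i]) []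
  mcA_codes l1

-- ===== PORT B =====
-- Source B's LAYOUT dict literal, read with .get: first-match lookup on distinct literal keys
def pvLayout (c : Char) : Option String :=
  if c = '2' then some "ABC" else if c = '3' then some "DEF"
  else if c = '4' then some "GHI" else if c = '5' then some "JKL"
  else if c = '6' then some "MNO" else if c = '7' then some "PQRS"
  else if c = '8' then some "TUV" else if c = '9' then some "WXYZ"
  else if c = '0' then some " " else none

-- the body of Source B's loop
def mcB_step (out : List String) (code : String) : List String :=
  match code.toList with
  | [] => out                              -- 'if code' fails on the empty token
  | c :: rest =>
    if rest.all (fun ch => ch == c) then   -- all(ch == code[0] for ch in code)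
      match pvLayout c with
      | some letters =>
          if code.toList.length ≤ letters.toList.length then
            -- letters[len(code)-1]: in range under the guard, getD default unreachable
            out ++ [String.ofList [letters.toList.getD (code.toList.length - 1) ' ']]
          else out
      | none => out
    else out

def main_code_alt (in_ : String) : String :=
  PySem.Str.join "" (((PySem.Str.split? in_ ",").getD []).foldl mcB_step [])

-- ===== PRECONDITION & SPEC =====
def Spec_main_code (in_ : String) (out : String) : Prop := out = main_code_alt in_
instance (in_ : String) (out : String) : Decidable (Spec_main_code in_ out) := by unfold Spec_main_code; infer_instance

-- ===== CLAIM (what is proved, stated in full; the proofs are below) =====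
def Claim_equal_main_code : Prop := ∀ (in_ : String), Dom_main_code in_ → Spec_main_code in_ (main_code in_)

-- ===== LEMMAS AND PROOFS =====

-- the letter(s) A's chain contributes for one token, phrased on the token's character list
def tokOf (cs : List Char) : List String :=
  if cs = ['2'] then ["A"]
  else if cs = ['2','2'] then ["B"]
  else if cs = ['2','2','2'] then ["C"]
  else if cs = ['3'] then ["D"]
  else if cs = ['3','3'] then ["E"]
  else if cs = ['3','3','3'] then ["F"]
  else if cs = ['4'] then ["G"]
  else if cs = ['4','4'] then ["H"]
  else if cs = ['4','4','4'] then ["I"]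
  else if cs = ['5'] then ["J"]
  else if cs = ['5','5'] then ["K"]
  else if cs = ['5','5','5'] then ["L"]
  else if cs = ['6'] then ["M"]
  else if cs = ['6','6'] then ["N"]
  else if cs = ['6','6','6'] then ["O"]
  else if cs = ['7'] then ["P"]
  else if cs = ['7','7'] then ["Q"]
  else if cs = ['7','7','7'] then ["R"]
  else if cs = ['7','7','7','7'] then ["S"]
  else if cs = ['8'] then ["T"]
  else if cs = ['8','8'] then ["U"]
  else if cs = ['8','8','8'] then ["V"]
  else if cs = ['9'] then ["W"]
  else if cs = ['9','9'] then ["X"]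
  else if cs = ['9','9','9'] then ["Y"]
  else if cs = ['9','9','9','9'] then ["Z"]
  else if cs = ['0'] then [" "]
  else []

theorem string_eq_iff_toList (s t : String) : s = t ↔ s.toList = t.toList := by
  constructor
  · intro h; rw [h]
  · intro h
    have := congrArg String.ofList h
    rwa [String.ofList_toList, String.ofList_toList] at this

set_option maxHeartbeats 4000000 in
theorem mcA_step_eq_tokOf (d : List String) (code : String) :
    mcA_step d code = d ++ tokOf code.toList := by
  simp only [mcA_step, tokOf, string_eq_iff_toList, String.reduceToList]
  by_cases h0 : code.toList = ['2']
  · rw [if_pos h0, if_pos h0]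
  rw [if_neg h0, if_neg h0]
  by_cases h1 : code.toList = ['2','2']
  · rw [if_pos h1, if_pos h1]
  rw [if_neg h1, if_neg h1]
  by_cases h2 : code.toList = ['2','2','2']
  · rw [if_pos h2, if_pos h2]
  rw [if_neg h2, if_neg h2]
  by_cases h3 : code.toList = ['3']
  · rw [if_pos h3, if_pos h3]
  rw [if_neg h3, if_neg h3]
  by_cases h4 : code.toList = ['3','3']
  · rw [if_pos h4, if_pos h4]
  rw [if_neg h4, if_neg h4]
  by_cases h5 : code.toList = ['3','3','3']
  · rw [if_pos h5, if_pos h5]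
  rw [if_neg h5, if_neg h5]
  by_cases h6 : code.toList = ['4']
  · rw [if_pos h6, if_pos h6]
  rw [if_neg h6, if_neg h6]
  by_cases h7 : code.toList = ['4','4']
  · rw [if_pos h7, if_pos h7]
  rw [if_neg h7, if_neg h7]
  by_cases h8 : code.toList = ['4','4','4']
  · rw [if_pos h8, if_pos h8]
  rw [if_neg h8, if_neg h8]
  by_cases h9 : code.toList = ['5']
  · rw [if_pos h9, if_pos h9]
  rw [if_neg h9, if_neg h9]
  by_cases h10 : code.toList = ['5','5']
  · rw [if_pos h10, if_pos h10]
  rw [if_neg h10, if_neg h10]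
  by_cases h11 : code.toList = ['5','5','5']
  · rw [if_pos h11, if_pos h11]
  rw [if_neg h11, if_neg h11]
  by_cases h12 : code.toList = ['6']
  · rw [if_pos h12, if_pos h12]
  rw [if_neg h12, if_neg h12]
  by_cases h13 : code.toList = ['6','6']
  · rw [if_pos h13, if_pos h13]
  rw [if_neg h13, if_neg h13]
  by_cases h14 : code.toList = ['6','6','6']
  · rw [if_pos h14, if_pos h14]
  rw [if_neg h14, if_neg h14]
  by_cases h15 : code.toList = ['7']
  · rw [if_pos h15, if_pos h15]
  rw [if_neg h15, if_neg h15]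
  by_cases h16 : code.toList = ['7','7']
  · rw [if_pos h16, if_pos h16]
  rw [if_neg h16, if_neg h16]
  by_cases h17 : code.toList = ['7','7','7']
  · rw [if_pos h17, if_pos h17]
  rw [if_neg h17, if_neg h17]
  by_cases h18 : code.toList = ['7','7','7','7']
  · rw [if_pos h18, if_pos h18]
  rw [if_neg h18, if_neg h18]
  by_cases h19 : code.toList = ['8']
  · rw [if_pos h19, if_pos h19]
  rw [if_neg h19, if_neg h19]
  by_cases h20 : code.toList = ['8','8']
  · rw [if_pos h20, if_pos h20]
  rw [if_neg h20, if_neg h20]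
  by_cases h21 : code.toList = ['8','8','8']
  · rw [if_pos h21, if_pos h21]
  rw [if_neg h21, if_neg h21]
  by_cases h22 : code.toList = ['9']
  · rw [if_pos h22, if_pos h22]
  rw [if_neg h22, if_neg h22]
  by_cases h23 : code.toList = ['9','9']
  · rw [if_pos h23, if_pos h23]
  rw [if_neg h23, if_neg h23]
  by_cases h24 : code.toList = ['9','9','9']
  · rw [if_pos h24, if_pos h24]
  rw [if_neg h24, if_neg h24]
  by_cases h25 : code.toList = ['9','9','9','9']
  · rw [if_pos h25, if_pos h25]
  rw [if_neg h25, if_neg h25]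
  by_cases h26 : code.toList = ['0']
  · rw [if_pos h26, if_pos h26]
  rw [if_neg h26, if_neg h26]
  exact (List.append_nil d).symm

set_option maxHeartbeats 4000000 in
theorem mcB_step_eq_tokOf (d : List String) (code : String) :
    mcB_step d code = d ++ tokOf code.toList := by
  rw [mcB_step]
  rcases h : code.toList with _ | ⟨a, rest⟩
  · simp [tokOf]
  · simp only [List.length_cons]
    by_cases hall : (rest.all (fun ch => ch == a)) = true
    · rw [if_pos hall]
      rcases rest with _ | ⟨b, _ | ⟨c, _ | ⟨e, _ | ⟨f, rest'⟩⟩⟩⟩ <;>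
        simp only [List.all_cons, List.all_nil, Bool.and_eq_true, beq_iff_eq, and_true] at hall
      · unfold pvLayout
        split_ifs with h1 h2 h3 h4 h5 h6 h7 h8 h9 <;> subst_vars <;> simp_all [tokOf]
      · obtain rfl := hall
        unfold pvLayout
        split_ifs with h1 h2 h3 h4 h5 h6 h7 h8 h9 <;> subst_vars <;> simp_all [tokOf]
      · obtain ⟨rfl, rfl⟩ := hall
        unfold pvLayout
        split_ifs with h1 h2 h3 h4 h5 h6 h7 h8 h9 <;> subst_vars <;> simp_all [tokOf]
      · obtain ⟨rfl, rfl, rfl⟩ := hall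
        unfold pvLayout
        split_ifs with h1 h2 h3 h4 h5 h6 h7 h8 h9 <;> subst_vars <;> simp_all [tokOf]
      · unfold pvLayout
        split_ifs with h1 h2 h3 h4 h5 h6 h7 h8 h9 <;> simp [tokOf]
    · rw [if_neg hall]
      rcases rest with _ | ⟨b, _ | ⟨c, _ | ⟨e, _ | ⟨f, rest'⟩⟩⟩⟩ <;>
        simp only [List.all_cons, List.all_nil, Bool.and_eq_true, beq_iff_eq, and_true] at hall
      · simp at hall
      · have : tokOf [a, b] = [] := by
          simp [tokOf]; split_ifs <;> simp_all
        rw [this]; simp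
      · have : tokOf [a, b, c] = [] := by
          simp [tokOf]; split_ifs <;> simp_all
        rw [this]; simp
      · have : tokOf [a, b, c, e] = [] := by
          simp [tokOf]; split_ifs <;> simp_all
        rw [this]; simp
      · have : tokOf (a :: b :: c :: e :: f :: rest') = [] := by simp [tokOf]
        rw [this]; simp

theorem mc_steps_eq : mcA_step = mcB_step := by
  funext d code
  rw [mcA_step_eq_tokOf, mcB_step_eq_tokOf]

-- ===== VERDICT (by name: the statement is the Claim_ definition above) =====
theorem main_code_spec : Claim_equal_main_code := by
  intro in_ _
  unfold Spec_main_code main_code main_code_alt mcA_codes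
  dsimp only
  rw [PySem.List.foldl_append_singleton, List.nil_append, mc_steps_eq]
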